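-- pv_equiv track=rewrite | github.com/parbo/icfp2011 | src/command.py | build_integer
-- ===== SOURCE A (Python) =====
-- def build_integer(i):
--     """ Return a sequence of integer operations that generates 'i'. """
--     op = []
--     while i > 0:
--         if i % 2 == 1:
--             op.append('succ')
--             i -= 1
--         else:
--             op.append('dbl')
--             i /= 2
--     op.reverse()
--     return op
-- ===== SOURCE B (Python) =====
-- def build_integer(i):
--     """ Return a sequence of integer operations that generates 'i'. """
--     if i <= 0:
--         return []
--     op = ['succ']
--     for b in bin(i)[3:]:  # binary digits after the leading '1', MSB first
--         op.append('dbl')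
--         if b == '1':
--             op.append('succ')
--     return op
-- ===== Notes on version B (the rewrite author's own statement) =====
-- stated objective: alternative
-- what changed: Replaces the LSB-first while-loop with append-then-reverse by a single MSB-first pass over bin(i): emit 'succ' for the leading bit, then 'dbl' (plus 'succ' on a 1-bit) per remaining bit, building the list in final order with no reverse.
import Mathlib
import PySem

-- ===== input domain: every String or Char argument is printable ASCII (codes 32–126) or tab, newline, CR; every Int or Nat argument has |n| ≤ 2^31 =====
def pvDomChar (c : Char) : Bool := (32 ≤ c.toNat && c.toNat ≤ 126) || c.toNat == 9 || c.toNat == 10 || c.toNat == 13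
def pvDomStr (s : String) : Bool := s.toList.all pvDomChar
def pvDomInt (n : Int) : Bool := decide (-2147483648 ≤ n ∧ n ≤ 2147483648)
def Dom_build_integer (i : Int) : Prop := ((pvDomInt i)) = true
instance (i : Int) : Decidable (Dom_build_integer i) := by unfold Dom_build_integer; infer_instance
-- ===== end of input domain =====

-- B builds the op list in one MSB-first pass over i's binary digits instead of A's
-- LSB-first loop followed by reverse; same O(log i) cost, different construction order.


-- ===== PORT A =====
-- A's while-loop with accumulator op.  Note: Python's `i /= 2` is FLOAT division; it is
-- taken only when i is even and |i| ≤ 2^31, where it is exact, so it is ported as exact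
-- integer halving `i / 2`.
def build_integer_loop (i : Int) (op : List String) : List String :=
  if i > 0 then
    if PySem.Int.mod i 2 = 1 then build_integer_loop (i - 1) (op ++ ["succ"])
    else build_integer_loop (i / 2) (op ++ ["dbl"])
  else op
termination_by i.toNat
decreasing_by all_goals omega

def build_integer (i : Int) : List String :=
  (build_integer_loop i []).reverse

-- ===== PORT B =====
-- hand port of Python's bin(n) digit string without the '0b' prefix, for n > 0:
-- binary digits of n, most significant first (exact for positive n).
def binDigits (n : Nat) : List Char :=
  if n = 0 then [] else binDigits (n / 2) ++ [if n % 2 = 1 then '1' else '0']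
termination_by n
decreasing_by omega

def build_integer_alt (i : Int) : List String :=
  if i ≤ 0 then []
  else
    -- op = ['succ']; for b in bin(i)[3:]: op.append('dbl'); if b == '1': op.append('succ')
    ((binDigits i.toNat).drop 1).foldl
      (fun op b => (op ++ ["dbl"]) ++ (if b = '1' then ["succ"] else [])) ["succ"]

-- ===== PRECONDITION & SPEC =====
def Spec_build_integer (i : Int) (out : List String) : Prop := out = build_integer_alt i
instance (i : Int) (out : List String) : Decidable (Spec_build_integer i out) := by unfold Spec_build_integer; infer_instance

-- ===== CLAIM (what is proved, stated in full; the proofs are below) =====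
def Claim_equal_build_integer : Prop := ∀ (i : Int), Dom_build_integer i → Spec_build_integer i (build_integer i)

-- ===== LEMMAS AND PROOFS =====

-- LSB-first op list produced by A's loop, on naturals.
def gA (n : Nat) : List String :=
  if n = 0 then [] else
  if n % 2 = 1 then "succ" :: gA (n - 1) else "dbl" :: gA (n / 2)
termination_by n
decreasing_by all_goals omega

-- B's fold, as a function of the natural number.
def EB (n : Nat) : List String :=
  ((binDigits n).drop 1).foldl
    (fun op b => (op ++ ["dbl"]) ++ (if b = '1' then ["succ"] else [])) ["succ"]

theorem gA_eq (n : Nat) : gA n =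
    (if n = 0 then [] else
     if n % 2 = 1 then "succ" :: gA (n - 1) else "dbl" :: gA (n / 2)) := by
  rw [gA]

theorem binDigits_eq (n : Nat) : binDigits n =
    (if n = 0 then [] else binDigits (n / 2) ++ [if n % 2 = 1 then '1' else '0']) := by
  rw [binDigits]

theorem loop_spec_aux : ∀ (n : Nat) (i : Int), i.toNat = n →
    ∀ (op : List String), build_integer_loop i op = op ++ gA n := by
  intro n
  induction n using Nat.strong_induction_on with
  | _ n ih =>
    intro i hn op
    rw [build_integer_loop]
    by_cases hp : i > 0
    · rw [if_pos hp, PySem.Int.mod_eq_emod_of_pos (by omega)]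
      by_cases ho : i % 2 = 1
      · rw [if_pos ho, ih (n - 1) (by omega) (i - 1) (by omega),
            gA_eq n, if_neg (by omega : ¬ n = 0), if_pos (by omega : n % 2 = 1)]
        simp
      · rw [if_neg ho, ih (n / 2) (by omega) (i / 2) (by omega),
            gA_eq n, if_neg (by omega : ¬ n = 0), if_neg (by omega : ¬ n % 2 = 1)]
        simp
    · rw [if_neg hp]
      have h0 : n = 0 := by omega
      subst h0; rw [gA]; simp

theorem loop_spec (i : Int) (op : List String) :
    build_integer_loop i op = op ++ gA i.toNat :=
  loop_spec_aux i.toNat i rfl op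

theorem binDigits_ne_nil {n : Nat} (h : n ≠ 0) : binDigits n ≠ [] := by
  rw [binDigits]; simp [h]

theorem EB_even {n : Nat} (h0 : 0 < n) (he : n % 2 = 0) :
    EB n = EB (n / 2) ++ ["dbl"] := by
  have hh : n / 2 ≠ 0 := by omega
  obtain ⟨y, ys, hys⟩ := List.exists_cons_of_ne_nil (binDigits_ne_nil hh)
  unfold EB
  rw [binDigits_eq n, if_neg (by omega : ¬ n = 0), if_neg (by omega : ¬ n % 2 = 1), hys]
  simp [List.foldl_append]

theorem EB_odd {n : Nat} (h1 : 1 < n) (ho : n % 2 = 1) :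
    EB n = EB (n - 1) ++ ["succ"] := by
  have hh : n / 2 ≠ 0 := by omega
  obtain ⟨y, ys, hys⟩ := List.exists_cons_of_ne_nil (binDigits_ne_nil hh)
  have hd : (n - 1) / 2 = n / 2 := by omega
  unfold EB
  rw [binDigits_eq n, if_neg (by omega : ¬ n = 0), if_pos ho]
  rw [binDigits_eq (n - 1), if_neg (by omega : ¬ n - 1 = 0),
      if_neg (by omega : ¬ (n - 1) % 2 = 1), hd, hys]
  simp [List.foldl_append]

theorem rev_gA (n : Nat) (h : 0 < n) : (gA n).reverse = EB n := by
  induction n using Nat.strong_induction_on with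
  | _ n ih =>
    rcases Nat.lt_or_ge 1 n with h1 | h1
    · by_cases ho : n % 2 = 1
      · rw [gA_eq n, if_neg (by omega : ¬ n = 0), if_pos ho, EB_odd h1 ho]
        simp [ih (n - 1) (by omega) (by omega)]
      · rw [gA_eq n, if_neg (by omega : ¬ n = 0), if_neg ho,
            EB_even h (by omega)]
        simp [ih (n / 2) (by omega) (by omega)]
    · have : n = 1 := by omega
      subst this
      rw [gA_eq 1]; norm_num
      rw [gA_eq 0]; norm_num
      unfold EB
      rw [binDigits_eq 1]; norm_num
      rw [binDigits_eq 0]; norm_num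

-- ===== VERDICT (by name: the statement is the Claim_ definition above) =====
theorem build_integer_spec : Claim_equal_build_integer := by
  intro i _
  unfold Spec_build_integer build_integer build_integer_alt
  rw [loop_spec]
  by_cases h : i ≤ 0
  · have : i.toNat = 0 := by omega
    rw [this, if_pos h, gA]; simp
  · rw [if_neg h]
    simpa [EB] using rev_gA i.toNat (by omega)
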